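-- pv_equiv track=rewrite | github.com/discovery3737-ops/zhen | app/services/modbus_master.py | _build_read_plan
-- ===== SOURCE A (Python) =====
-- from typing import Any
--
-- POLL_FAST = "FAST"
--
-- POLL_SLOW = "SLOW"
--
-- POLL_VERY_SLOW = "VERY_SLOW"
--
-- def _ranges(items: list[dict], key_addr: str = "addr0") -> list[tuple[int, int]]:
--     if not items:
--         return []
--     addrs = sorted(set(p[key_addr] for p in items))
--     ranges_: list[tuple[int, int]] = []
--     start, count = addrs[0], 1
--     for i in range(1, len(addrs)):
--         if addrs[i] == addrs[i - 1] + 1: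
--             count += 1
--         else:
--             ranges_.append((start, count))
--             start, count = addrs[i], 1
--     ranges_.append((start, count))
--     return ranges_
--
-- def _points_by_poll(spec: dict[str, Any]) -> dict[str, list[tuple[str, str, int, dict]]]:
--     out: dict[str, list[tuple[str, str, int, dict]]] = {
--         POLL_FAST: [], POLL_SLOW: [], POLL_VERY_SLOW: [],
--     }
--     block_keys = ("coils", "discrete_inputs", "holding_regs", "input_regs")
--     for sid, blocks in spec.items():
--         for block_key in block_keys:
--             for p in blocks.get(block_key, []):
--                 poll = (p.get("poll") or "").strip().upper()
--                 if poll not in out or poll == "N/A":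
--                     continue
--                 out[poll].append((sid, block_key, int(p.get("addr0", 0)), p))
--     return out
--
-- def _build_read_plan(spec: dict, poll_group: str) -> list[tuple[str, str, int, int]]:
--     by_poll = _points_by_poll(spec)
--     points = by_poll.get(poll_group, [])
--     by_slave_block: dict[tuple[str, str], list[int]] = {}
--     for sid, block_key, addr0, _ in points:
--         k = (sid, block_key)
--         if k not in by_slave_block:
--             by_slave_block[k] = []
--         by_slave_block[k].append(addr0)
--     plan = []
--     for (sid, block), addrs in by_slave_block.items():
--         addrs = sorted(set(addrs))
--         for start, count in _ranges([{"addr0": a} for a in addrs]):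
--             plan.append((sid, block, start, count))
--     return plan
-- ===== SOURCE B (Python) =====
-- POLL_FAST = "FAST"
--
-- POLL_SLOW = "SLOW"
--
-- POLL_VERY_SLOW = "VERY_SLOW"
--
-- _BLOCK_KEYS = ("coils", "discrete_inputs", "holding_regs", "input_regs")
--
--
-- def _build_read_plan(spec: dict, poll_group: str) -> list[tuple[str, str, int, int]]:
--     if poll_group not in (POLL_FAST, POLL_SLOW, POLL_VERY_SLOW):
--         return []
--     # one fused pass: group the matching addresses by (slave, block) straight away
--     groups: dict[tuple[str, str], set] = {}
--     for sid, blocks in spec.items():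
--         for block_key in _BLOCK_KEYS:
--             for p in blocks.get(block_key, []):
--                 if (p.get("poll") or "").strip().upper() == poll_group:
--                     groups.setdefault((sid, block_key), set()).add(int(p.get("addr0", 0)))
--     plan = []
--     for (sid, block), addrs in groups.items():
--         # contiguous runs = groups of equal (addr - index) over the sorted addresses
--         runs: dict = {}
--         for i, a in enumerate(sorted(addrs)):
--             runs.setdefault(a - i, []).append(a)
--         for run in runs.values():
--             plan.append((sid, block, run[0], len(run)))
--     return plan
-- ===== Notes on version B (the rewrite author's own statement) =====
-- stated objective: simpler
-- what changed: B fuses A's three-stage pipeline (_points_by_poll split over all poll classes, regrouping by (slave, block), and the pairwise-difference _ranges loop) into one pass that groups matching addresses by (slave, block) directly and then finds contiguous runs by bucketing sorted addresses on the constant offset addr-minus-index.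
import Mathlib
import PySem

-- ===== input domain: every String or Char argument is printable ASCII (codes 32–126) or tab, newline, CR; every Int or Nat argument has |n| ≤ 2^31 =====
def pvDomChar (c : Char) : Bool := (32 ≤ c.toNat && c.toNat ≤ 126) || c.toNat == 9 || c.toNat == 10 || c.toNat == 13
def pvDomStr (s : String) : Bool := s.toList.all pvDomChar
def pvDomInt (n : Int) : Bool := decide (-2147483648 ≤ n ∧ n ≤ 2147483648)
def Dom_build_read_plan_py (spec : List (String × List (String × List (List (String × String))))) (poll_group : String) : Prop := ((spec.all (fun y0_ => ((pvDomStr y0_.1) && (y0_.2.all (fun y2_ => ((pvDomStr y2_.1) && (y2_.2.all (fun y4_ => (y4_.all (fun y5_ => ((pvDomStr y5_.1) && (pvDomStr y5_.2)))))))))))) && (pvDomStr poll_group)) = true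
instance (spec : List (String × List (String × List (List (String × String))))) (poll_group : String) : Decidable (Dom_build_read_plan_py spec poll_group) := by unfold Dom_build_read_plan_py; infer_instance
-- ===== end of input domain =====

-- B replaces A's three-helper pipeline (split all points by poll, regroup by slave/block, pairwise-difference
-- run loop) by one fused grouping pass and addr-minus-index run grouping; return value only, no mutation.

-- shared transliteration helpers (the same Python expressions occur verbatim in A and in B):
-- (p.get("poll") or "").strip().upper()
def pvPollOf (p : List (String × String)) : String :=
  PySem.Str.upper (PySem.Str.strip ((PySem.Dict.mk p).getD "poll" ""))

-- int(p.get("addr0", 0)); PySem.Int.ofStr? is none exactly where int() raises ValueError (excluded by Pre_)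
def pvAddr0Of (p : List (String × String)) : Int :=
  match (PySem.Dict.mk p).get? "addr0" with
  | none => 0
  | some s => (PySem.Int.ofStr? s).getD 0

-- ("coils", "discrete_inputs", "holding_regs", "input_regs")
def pvBlockKeys : List String := ["coils", "discrete_inputs", "holding_regs", "input_regs"]

-- ===== PORT A =====

-- _ranges(items, "addr0"); every dict the caller passes carries "addr0", so getD is exact there
def pyRangesA (items : List (List (String × Int))) : List (Int × Int) :=
  if items = [] then []
  else
    let addrs := PySem.List.sorted
      (PySem.Set.ofList (items.map (fun p => (PySem.Dict.mk p).getD "addr0" 0))) (fun x => x)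
    let r := (PySem.List.pyRange 1 (addrs.length : Int)).foldl
      (fun (st : List (Int × Int) × Int × Int) i =>
        if PySem.List.pyGetD addrs i 0 = PySem.List.pyGetD addrs (i - 1) 0 + 1 then
          (st.1, st.2.1, st.2.2 + 1)
        else
          (st.1 ++ [(st.2.1, st.2.2)], PySem.List.pyGetD addrs i 0, 1))
      ([], PySem.List.pyGetD addrs 0 0, 1)
    r.1 ++ [(r.2.1, r.2.2)]

-- _points_by_poll(spec)
def pyPointsByPollA (spec : List (String × List (String × List (List (String × String))))) :
    PySem.Dict String (List (String × String × Int × List (String × String))) :=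
  spec.foldl (fun out sb =>
    pvBlockKeys.foldl (fun out bk =>
      ((PySem.Dict.mk sb.2).getD bk []).foldl (fun out p =>
        let poll := pvPollOf p
        if !out.contains poll || poll == "N/A" then out
        else out.modify poll [] (fun v => v ++ [(sb.1, bk, pvAddr0Of p, p)])) out) out)
    (PySem.Dict.mk [("FAST", []), ("SLOW", []), ("VERY_SLOW", [])])

def build_read_plan_py (spec : List (String × List (String × List (List (String × String))))) (poll_group : String) : List (String × String × Int × Int) :=
  let by_poll := pyPointsByPollA spec
  let points := by_poll.getD poll_group []
  let by_slave_block : PySem.Dict (String × String) (List Int) :=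
    points.foldl (fun d q =>
      let k := (q.1, q.2.1)
      let d := if d.contains k then d else d.insert k []
      d.modify k [] (fun v => v ++ [q.2.2.1])) PySem.Dict.empty
  by_slave_block.items.foldl (fun plan kv =>
    let addrs := PySem.List.sorted (PySem.Set.ofList kv.2) (fun x => x)
    (pyRangesA (addrs.map (fun a => [("addr0", a)]))).foldl
      (fun plan sc => plan ++ [(kv.1.1, kv.1.2, sc.1, sc.2)]) plan) []

-- ===== PORT B =====

def build_read_plan_py_alt (spec : List (String × List (String × List (List (String × String))))) (poll_group : String) : List (String × String × Int × Int) :=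
  if !(poll_group == "FAST" || poll_group == "SLOW" || poll_group == "VERY_SLOW") then []
  else
    let groups : PySem.Dict (String × String) (PySem.Set Int) :=
      spec.foldl (fun g sb =>
        pvBlockKeys.foldl (fun g bk =>
          ((PySem.Dict.mk sb.2).getD bk []).foldl (fun g p =>
            if pvPollOf p == poll_group then
              (g.setdefault (sb.1, bk) PySem.Set.empty).modify (sb.1, bk) PySem.Set.empty
                (fun s => PySem.Set.add s (pvAddr0Of p))
            else g) g) g) PySem.Dict.empty
    groups.items.foldl (fun plan kv =>
      let runs : PySem.Dict Int (List Int) :=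
        (PySem.List.enumerate (PySem.List.sorted kv.2 (fun x => x))).foldl
          (fun r ia =>
            (r.setdefault (ia.2 - ia.1) []).modify (ia.2 - ia.1) [] (fun run => run ++ [ia.2]))
          PySem.Dict.empty
      runs.values.foldl (fun plan run =>
        plan ++ [(kv.1.1, kv.1.2, PySem.List.pyGetD run 0 0, (run.length : Int))]) plan) []

-- ===== PRECONDITION & SPEC =====

-- Pre_ excludes exactly the inputs on which the Python A raises ValueError: some point whose normalized
-- poll is FAST/SLOW/VERY_SLOW carries an "addr0" string that int() cannot parse.
def Pre_build_read_plan_py (spec : List (String × List (String × List (List (String × String))))) (poll_group : String) : Prop :=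
  ∀ sb ∈ spec, ∀ bk ∈ pvBlockKeys, ∀ p ∈ (PySem.Dict.mk sb.2).getD bk [],
    (let poll := PySem.Str.upper (PySem.Str.strip ((PySem.Dict.mk p).getD "poll" ""))
     poll = "FAST" ∨ poll = "SLOW" ∨ poll = "VERY_SLOW") →
    (((PySem.Dict.mk p).get? "addr0").all (fun s => (PySem.Int.ofStr? s).isSome)) = true
instance (spec : List (String × List (String × List (List (String × String))))) (poll_group : String) : Decidable (Pre_build_read_plan_py spec poll_group) := by unfold Pre_build_read_plan_py; infer_instance

def pvWitness_build_read_plan_py : (List (String × List (String × List (List (String × String))))) × String :=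
  ([("s1", [("coils", [[("poll", "FAST"), ("addr0", "1")], [("addr0", "2"), ("poll", " fast ")],
                       [("addr0", "4"), ("poll", "FAST")]]),
            ("holding_regs", [[("poll", "SLOW"), ("addr0", "10")]])])], "FAST")

def Spec_build_read_plan_py (spec : List (String × List (String × List (List (String × String))))) (poll_group : String) (out : List (String × String × Int × Int)) : Prop := out = build_read_plan_py_alt spec poll_group
instance (spec : List (String × List (String × List (List (String × String))))) (poll_group : String) (out : List (String × String × Int × Int)) : Decidable (Spec_build_read_plan_py spec poll_group out) := by unfold Spec_build_read_plan_py; infer_instance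

-- ===== CLAIM (what is proved, stated in full; the proofs are below) =====
def Claim_equal_build_read_plan_py : Prop := ∀ (spec : List (String × List (String × List (List (String × String))))) (poll_group : String), Dom_build_read_plan_py spec poll_group → Pre_build_read_plan_py spec poll_group → Spec_build_read_plan_py spec poll_group (build_read_plan_py spec poll_group)

-- ===== LEMMAS AND PROOFS =====

-- the flattened traversal both programs make: (sid, block_key, point) triples in visit order
def pvPts (spec : List (String × List (String × List (List (String × String))))) :
    List (String × String × List (String × String)) :=
  spec.flatMap (fun sb =>
    pvBlockKeys.flatMap (fun bk =>
      ((PySem.Dict.mk sb.2).getD bk []).map (fun p => (sb.1, bk, p))))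

-- maximal blocks of consecutive integers, reading left to right
def chunks : List Int → List (List Int)
  | [] => []
  | [x] => [[x]]
  | x :: y :: t =>
    if y = x + 1 then
      match chunks (y :: t) with
      | [] => [[x]]
      | r :: rs => (x :: r) :: rs
    else [x] :: chunks (y :: t)

-- A's run loop as a structural recursion (prev = last address of the open run)
def aruns : Int → Int → Int → List Int → List (Int × Int)
  | _, st, c, [] => [(st, c)]
  | prev, st, c, y :: t => if y = prev + 1 then aruns y st (c + 1) t else (st, c) :: aruns y y 1 t

theorem chunks_cons_head (t : List Int) (x : Int) : ∃ r rs, chunks (x :: t) = (x :: r) :: rs := by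
  match t with
  | [] => exact ⟨[], [], rfl⟩
  | y :: t' =>
    simp only [chunks]
    split
    · rcases h : chunks (y :: t') with _ | ⟨r, rs⟩
      · exact ⟨[], [], rfl⟩
      · exact ⟨r, rs, rfl⟩
    · exact ⟨[], chunks (y :: t'), rfl⟩

theorem aruns_chunks (t : List Int) : ∀ (prev st c : Int),
    aruns prev st c t =
      (st, c - 1 + (((chunks (prev :: t)).headD []).length : Int)) ::
        ((chunks (prev :: t)).tail).map (fun r => (PySem.List.pyGetD r 0 0, (r.length : Int))) := by
  induction t with
  | nil => intro prev st c; simp [aruns, chunks]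
  | cons y t' ih =>
    intro prev st c
    obtain ⟨r', rs, hc⟩ := chunks_cons_head t' y
    by_cases h : y = prev + 1
    · rw [aruns, if_pos h, ih y st (c + 1)]
      have : chunks (prev :: y :: t') = (prev :: y :: r') :: rs := by
        simp only [chunks, if_pos h, hc]
      rw [this, hc]
      simp only [List.headD_cons, List.tail_cons, List.length_cons]
      congr 2
      push_cast; ring
    · rw [aruns, if_neg h, ih y y 1]
      have : chunks (prev :: y :: t') = [prev] :: (y :: r') :: rs := by
        simp only [chunks, if_neg h, hc]
      rw [this, hc]
      have hg : PySem.List.pyGetD (y :: r') 0 0 = y := by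
        simpa using PySem.List.pyGetD_natCast (y :: r') 0 0
      simp only [List.headD_cons, List.tail_cons, List.length_cons, List.map_cons, hg]
      norm_num

theorem zipfold (t : List Int) : ∀ (prev : Int) (acc : List (Int × Int)) (st c : Int),
    (let r := ((prev :: t).zip t).foldl
        (fun (stt : List (Int × Int) × Int × Int) pr =>
          if pr.2 = pr.1 + 1 then (stt.1, stt.2.1, stt.2.2 + 1)
          else (stt.1 ++ [(stt.2.1, stt.2.2)], pr.2, 1)) (acc, st, c)
     r.1 ++ [(r.2.1, r.2.2)]) = acc ++ aruns prev st c t := by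
  induction t with
  | nil => intro prev acc st c; simp [aruns]
  | cons y t' ih =>
    intro prev acc st c
    simp only [List.zip_cons_cons, List.foldl_cons]
    by_cases h : y = prev + 1
    · simpa [h, aruns] using ih y acc st (c + 1)
    · rw [aruns, if_neg h]
      simpa [h] using (ih y (acc ++ [(st, c)]) y 1).trans (by simp)

theorem foldl_pyRange_adj {σ : Type} (s : List Int) (g : σ → Int → Int → σ) :
    ∀ (n k : Nat) (init : σ), s.length - k = n → 1 ≤ k →
    (PySem.List.pyRange (k : Int) (s.length : Int)).foldl
        (fun acc i => g acc (PySem.List.pyGetD s (i - 1) 0) (PySem.List.pyGetD s i 0)) init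
      = ((s.drop (k - 1)).zip (s.drop k)).foldl (fun acc pr => g acc pr.1 pr.2) init := by
  intro n
  induction n with
  | zero =>
    intro k init hn hk
    have hle : s.length ≤ k := by omega
    rw [PySem.List.pyRange_one_eq_nil (by exact_mod_cast hle)]
    rw [List.drop_eq_nil_of_le hle]
    simp
  | succ m ih =>
    intro k init hn hk
    have hlt : k < s.length := by omega
    rw [PySem.List.pyRange_one_cons (by exact_mod_cast hlt)]
    simp only [List.foldl_cons]
    have h1 : ((k : Int) - 1) = ((k - 1 : Nat) : Int) := by
      push_cast [hk]; ring
    have e1 : PySem.List.pyGetD s ((k : Int) - 1) 0 = s[k - 1]'(by omega) := by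
      rw [h1, PySem.List.pyGetD_natCast, List.getD_eq_getElem s 0 (by omega)]
    have e2 : PySem.List.pyGetD s (k : Int) 0 = s[k]'hlt := by
      rw [PySem.List.pyGetD_natCast, List.getD_eq_getElem s 0 hlt]
    have hk1 : k - 1 + 1 = k := by omega
    have d1 : s.drop (k - 1) = s[k - 1]'(by omega) :: s.drop k := by
      rw [List.drop_eq_getElem_cons (by omega : k - 1 < s.length), hk1]
    have d2 : s.drop k = s[k]'hlt :: s.drop (k + 1) := List.drop_eq_getElem_cons hlt
    rw [e1, e2, d1, d2, List.zip_cons_cons, List.foldl_cons]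
    rw [show ((k : Int) + 1) = ((k + 1 : Nat) : Int) by push_cast; ring]
    simpa [← d2, Nat.add_sub_cancel] using
      ih (k + 1) (g init (s[k - 1]'(by omega)) (s[k]'hlt)) (by omega) (by omega)

theorem off_lb (t : List Int) : ∀ (x i : Int), (x :: t).Pairwise (· < ·) →
    ∀ ia ∈ PySem.List.enumerate (x :: t) i, x - i ≤ ia.2 - ia.1 := by
  induction t with
  | nil =>
    intro x i _ ia hia
    simp [PySem.List.enumerate] at hia
    simp [hia]
  | cons y t' ih =>
    intro x i hp ia hia
    rw [PySem.List.enumerate_cons] at hia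
    rcases List.mem_cons.mp hia with h | h
    · simp [h]
    · have hxy : x < y := (List.pairwise_cons.mp hp).1 y (by simp)
      have := ih y (i + 1) (List.pairwise_cons.mp hp).2 ia h
      omega

theorem ofList_cons_cons_self {α : Type} [BEq α] [LawfulBEq α] (a : α) (l : List α) :
    PySem.Set.ofList (a :: a :: l) = PySem.Set.ofList (a :: l) := by
  rw [PySem.Set.ofList_eq_foldl, PySem.Set.ofList_eq_foldl]
  simp only [List.foldl_cons]
  rw [PySem.Set.add_of_mem]
  simp [PySem.Set.add]

theorem discard_of_not_mem {α : Type} [BEq α] [LawfulBEq α] (s : PySem.Set α) (a : α) (h : a ∉ s) :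
    PySem.Set.discard s a = s := by
  rw [PySem.Set.discard.eq_1]
  apply List.filter_eq_self.mpr
  intro b hb
  simp
  exact fun e => h (e ▸ hb)

theorem grp (s : List Int) : s.Pairwise (· < ·) → ∀ (i : Int),
    (PySem.Set.ofList ((PySem.List.enumerate s i).map (fun ia => ia.2 - ia.1))).map
        (fun o => ((PySem.List.enumerate s i).filter (fun ia => ia.2 - ia.1 == o)).map (fun ia => ia.2))
      = chunks s := by
  induction s with
  | nil => intro _ i; simp [PySem.List.enumerate, chunks, PySem.Set.ofList_nil]
  | cons x t ih =>
    intro hp i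
    match t, ih with
    | [], _ =>
      simp [PySem.List.enumerate, chunks, PySem.Set.ofList, PySem.Set.add, PySem.Set.empty,
        PySem.Set.contains]
    | y :: t', ih =>
      have hp' : (y :: t').Pairwise (· < ·) := (List.pairwise_cons.mp hp).2
      have hxy : x < y := (List.pairwise_cons.mp hp).1 y (by simp)
      have ihh := ih hp' (i + 1)
      obtain ⟨r', rs, hc⟩ := chunks_cons_head t' y
      rw [PySem.List.enumerate_cons]
      by_cases h : y = x + 1
      · -- consecutive: the head shares the offset of the second element
        have hoff : y - (i + 1) = x - i := by omega
        rw [PySem.List.enumerate_cons] at ihh ⊢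
        -- offsets list: (x - i) :: (x - i) :: rest
        have e1 : ((i, x) :: (i + 1, y) :: PySem.List.enumerate t' (i + 1 + 1)).map
            (fun ia => ia.2 - ia.1) = (x - i) :: (x - i) ::
              (PySem.List.enumerate t' (i + 1 + 1)).map (fun ia => ia.2 - ia.1) := by
          simp [hoff]
        rw [e1, ofList_cons_cons_self]
        have e2 : ((i + 1, y) :: PySem.List.enumerate t' (i + 1 + 1)).map
            (fun ia => ia.2 - ia.1) = (x - i) ::
              (PySem.List.enumerate t' (i + 1 + 1)).map (fun ia => ia.2 - ia.1) := by
          simp [hoff]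
        rw [e2] at ihh
        -- keys = (x - i) :: K' with x - i ∉ K'
        rw [PySem.Set.ofList_cons] at ihh ⊢
        set K' := (PySem.Set.ofList ((PySem.List.enumerate t' (i + 1 + 1)).map
          (fun ia => ia.2 - ia.1))).discard (x - i) with hK'
        have hnK' : (x - i) ∉ K' := by
          intro hm
          have := (PySem.Set.mem_discard _ _ _).mp hm
          simp at this
        rw [List.map_cons] at ihh ⊢
        rw [hc] at ihh
        have hfirst :
            (((i, x) :: (i + 1, y) :: PySem.List.enumerate t' (i + 1 + 1)).filter
              (fun ia => ia.2 - ia.1 == (x - i))).map (fun ia => ia.2)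
            = x :: (((i + 1, y) :: PySem.List.enumerate t' (i + 1 + 1)).filter
              (fun ia => ia.2 - ia.1 == (x - i))).map (fun ia => ia.2) := by
          rw [List.filter_cons]
          simp
        rw [hfirst]
        have hhead := (List.cons.injEq _ _ _ _).mp ihh
        rw [hhead.1]
        have hrest : K'.map (fun o => (((i, x) :: (i + 1, y) ::
              PySem.List.enumerate t' (i + 1 + 1)).filter
              (fun ia => ia.2 - ia.1 == o)).map (fun ia => ia.2))
            = K'.map (fun o => (((i + 1, y) ::
              PySem.List.enumerate t' (i + 1 + 1)).filter
              (fun ia => ia.2 - ia.1 == o)).map (fun ia => ia.2)) := by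
          apply List.map_congr_left
          intro o ho
          have hne : ¬(x - i == o) = true := by
            simp
            intro e
            exact hnK' (e ▸ ho)
          rw [List.filter_cons, if_neg (by simpa using hne)]
        rw [hrest, hhead.2]
        have : chunks (x :: y :: t') = (x :: y :: r') :: rs := by
          simp only [chunks, if_pos h, hc]
        rw [this]
      · -- gap: the head opens its own singleton chunk
        have hgap : ∀ ia ∈ PySem.List.enumerate (y :: t') (i + 1), x - i < ia.2 - ia.1 := by
          intro ia hia
          have := off_lb t' y (i + 1) hp' ia hia
          omega
        have hnm : (x - i) ∉ ((PySem.List.enumerate (y :: t') (i + 1)).map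
            (fun ia => ia.2 - ia.1)) := by
          intro hm
          obtain ⟨ia, hia, he⟩ := List.mem_map.mp hm
          exact absurd he (by have := hgap ia hia; omega)
        rw [List.map_cons, PySem.Set.ofList_cons, discard_of_not_mem _ _
          (by intro hm; exact hnm ((PySem.Set.mem_ofList _ _).mp hm)), List.map_cons]
        have hfirst : (((i, x) :: PySem.List.enumerate (y :: t') (i + 1)).filter
              (fun ia => ia.2 - ia.1 == (x - i))).map (fun ia => ia.2) = [x] := by
          rw [List.filter_cons]
          simp only [show ((x : Int) - i == x - i) = true by simp, if_pos]
          have : (PySem.List.enumerate (y :: t') (i + 1)).filter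
              (fun ia => ia.2 - ia.1 == (x - i)) = [] :=
            List.filter_eq_nil_iff.mpr (fun ia hia => by
              have := hgap ia hia
              simp
              omega)
          rw [this]
          rfl
        rw [hfirst]
        have hrest : (PySem.Set.ofList ((PySem.List.enumerate (y :: t') (i + 1)).map
              (fun ia => ia.2 - ia.1))).map (fun o => (((i, x) ::
              PySem.List.enumerate (y :: t') (i + 1)).filter
              (fun ia => ia.2 - ia.1 == o)).map (fun ia => ia.2))
            = (PySem.Set.ofList ((PySem.List.enumerate (y :: t') (i + 1)).map
              (fun ia => ia.2 - ia.1))).map (fun o => ((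
              PySem.List.enumerate (y :: t') (i + 1)).filter
              (fun ia => ia.2 - ia.1 == o)).map (fun ia => ia.2)) := by
          apply List.map_congr_left
          intro o ho
          have : (x - i) ≠ o := by
            intro e
            exact hnm (e ▸ (PySem.Set.mem_ofList _ _).mp ho)
          rw [List.filter_cons, if_neg (by simpa using this)]
        rw [hrest, ihh]
        have : chunks (x :: y :: t') = [x] :: chunks (y :: t') := by
          simp only [chunks, if_neg h]
        rw [this]

theorem getD_foldl_setmod {α κ ν : Type} [BEq κ] [LawfulBEq κ] [DecidableEq κ]
    (key : α → κ) (f : ν → α → ν) (v0 : ν) (l : List α) :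
    ∀ (d : PySem.Dict κ ν) (c : κ),
    (l.foldl (fun d t => (d.setdefault (key t) v0).modify (key t) v0 (fun v => f v t)) d).getD c v0
      = (l.filter (fun t => key t == c)).foldl (fun v t => f v t) (d.getD c v0) := by
  induction l with
  | nil => intro d c; simp
  | cons a l ih =>
    intro d c
    simp only [List.foldl_cons, List.filter_cons]
    by_cases hc : key a = c
    · subst hc
      rw [ih]
      simp only [BEq.rfl, if_pos]
      rw [List.foldl_cons]
      congr 1
      rw [PySem.Dict.getD_modify_self, PySem.Dict.getD_setdefault_self]
    · rw [ih]
      have h1 : (if (key a == c) = true then a :: List.filter (fun t => key t == c) l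
          else List.filter (fun t => key t == c) l) = List.filter (fun t => key t == c) l := by
        simp [hc]
      rw [h1]
      congr 1
      rw [PySem.Dict.getD_modify _ _ _ _ _, if_neg (fun e => hc e.symm),
        PySem.Dict.getD_eq_get?_getD, PySem.Dict.get?_setdefault_of_ne _ _ (fun e => hc e.symm),
        ← PySem.Dict.getD_eq_get?_getD]

theorem keys_foldl_setmod {α κ ν : Type} [BEq κ] [LawfulBEq κ]
    (key : α → κ) (f : ν → α → ν) (v0 : ν) (l : List α) :
    ∀ (d : PySem.Dict κ ν),
    (l.foldl (fun d t => (d.setdefault (key t) v0).modify (key t) v0 (fun v => f v t)) d).keys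
      = PySem.Set.update d.keys (l.map key) := by
  induction l with
  | nil => intro d; simp [PySem.Set.update]
  | cons a l ih =>
    intro d
    simp only [List.foldl_cons, List.map_cons, PySem.Set.update_cons]
    rw [ih]
    congr 1
    rw [PySem.Dict.keys_modify, PySem.Dict.keys_insert_of_contains _ _
      (by rw [PySem.Dict.contains_setdefault]; simp), PySem.Dict.keys_setdefault,
      PySem.Set.add_eq_ite]
    by_cases h : d.contains (key a)
    · rw [if_pos h, if_pos ((PySem.Dict.contains_iff_mem_keys _ _).mp h)]
    · rw [if_neg h, if_neg (fun hm => h ((PySem.Dict.contains_iff_mem_keys _ _).mpr hm))]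

theorem contains_foldl_pbp {α : Type} (pol : α → String) (g : α → String × String × Int × List (String × String)) (l : List α) :
    ∀ (d : PySem.Dict String (List (String × String × Int × List (String × String)))) (q : String),
    (l.foldl (fun out t =>
        if !out.contains (pol t) || pol t == "N/A" then out
        else out.modify (pol t) [] (fun v => v ++ [g t])) d).contains q = d.contains q := by
  induction l with
  | nil => intro d q; rfl
  | cons a l ih =>
    intro d q
    simp only [List.foldl_cons]
    rw [ih]
    by_cases hb : (!d.contains (pol a) || pol a == "N/A") = true
    · rw [if_pos hb]
    · rw [if_neg hb, PySem.Dict.contains_modify]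
      have hcp : d.contains (pol a) = true := by
        by_contra hcc
        simp at hcc hb
        rw [hcc] at hb
        simp at hb
      by_cases hq : q = pol a
      · simp [hq, hcp]
      · simp [hq]

theorem getD_foldl_pbp {α : Type} (pol : α → String) (g : α → String × String × Int × List (String × String)) (l : List α) :
    ∀ (d : PySem.Dict String (List (String × String × Int × List (String × String)))) (pg : String),
    d.contains pg = true → pg ≠ "N/A" →
    (l.foldl (fun out t =>
        if !out.contains (pol t) || pol t == "N/A" then out
        else out.modify (pol t) [] (fun v => v ++ [g t])) d).getD pg []
      = d.getD pg [] ++ (l.filter (fun t => pol t == pg)).map g := by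
  induction l with
  | nil => intro d pg _ _; simp
  | cons a l ih =>
    intro d pg hcg hna
    simp only [List.foldl_cons, List.filter_cons]
    by_cases hp : pol a = pg
    · rw [hp]
      have hb : (!d.contains pg || pg == "N/A") = false := by
        simp [hcg, hna]
      rw [if_neg (by simp [hb] : ¬(!d.contains pg || pg == "N/A") = true)]
      rw [ih _ pg (by rw [PySem.Dict.contains_modify]; simp) hna]
      rw [PySem.Dict.getD_modify_self]
      simp
    · have hfil : (if (pol a == pg) = true then a :: List.filter (fun t => pol t == pg) l
          else List.filter (fun t => pol t == pg) l) = List.filter (fun t => pol t == pg) l := by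
        simp [hp]
      rw [hfil]
      by_cases hb : (!d.contains (pol a) || pol a == "N/A") = true
      · rw [if_pos hb, ih _ pg hcg hna]
      · rw [if_neg hb]
        rw [ih _ pg (by rw [PySem.Dict.contains_modify]; simp [hcg]) hna]
        congr 1
        rw [PySem.Dict.getD_modify _ _ _ _ _, if_neg (fun e => hp e.symm)]

-- per-(slave, block) equality: A's _ranges on the sorted set = B's offset-grouped runs
theorem perkey (v : List Int) :
    pyRangesA ((PySem.List.sorted (PySem.Set.ofList v) (fun x => x)).map (fun a => [("addr0", a)]))
      = (chunks (PySem.List.sorted (PySem.Set.ofList v) (fun x => x))).map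
          (fun r => (PySem.List.pyGetD r 0 0, (r.length : Int))) := by
  have hlt := PySem.List.sorted_ofList_pairwise_lt v
  rcases hseq : PySem.List.sorted (PySem.Set.ofList v) (fun x => x) with _ | ⟨x, t⟩
  · simp [pyRangesA, chunks]
  · rw [hseq] at hlt
    have hnodup : (x :: t).Nodup := hlt.imp (fun h => ne_of_lt h)
    unfold pyRangesA
    rw [if_neg (by simp)]
    have hunwrap : ((x :: t).map (fun a => [("addr0", a)])).map
        (fun p => (PySem.Dict.mk p).getD "addr0" 0) = x :: t := by
      rw [List.map_map]
      have : ∀ a : Int, (PySem.Dict.mk [("addr0", a)]).getD "addr0" 0 = a := fun a => rfl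
      simp [Function.comp_def, this]
    rw [hunwrap, PySem.Set.ofList_eq_self_of_nodup _ hnodup,
      PySem.List.sorted_eq_self_of_pairwise _ _ (hlt.imp (fun h => le_of_lt h))]
    have hadj := foldl_pyRange_adj (x :: t)
      (fun (acc : List (Int × Int) × Int × Int) p c =>
        if c = p + 1 then (acc.1, acc.2.1, acc.2.2 + 1)
        else (acc.1 ++ [(acc.2.1, acc.2.2)], c, 1))
      ((x :: t).length - 1) 1 ([], PySem.List.pyGetD (x :: t) 0 0, 1) rfl (le_refl 1)
    simp only [List.drop_zero, List.drop_one, List.tail_cons, Nat.sub_self] at hadj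
    dsimp only [] at hadj ⊢
    rw [show ((1 : Int)) = ((1 : Nat) : Int) by norm_num] at hadj ⊢
    rw [hadj]
    have hx0 : PySem.List.pyGetD (x :: t) 0 0 = x := by
      simpa using PySem.List.pyGetD_natCast (x :: t) 0 0
    rw [hx0]
    have hz := zipfold t x [] x 1
    dsimp only [] at hz
    rw [show ((1 : Int)) = ((1 : Nat) : Int) by norm_num] at hz
    rw [hz, List.nil_append, aruns_chunks]
    obtain ⟨r, rs, hc⟩ := chunks_cons_head t x
    rw [hc]
    simp only [List.headD_cons, List.tail_cons, List.map_cons, List.length_cons]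
    congr 2
    · symm
      simpa using PySem.List.pyGetD_natCast (x :: r) 0 0
    · push_cast; ring


theorem setdefault_eq_ite {κ ν : Type} [BEq κ] (d : PySem.Dict κ ν) (k : κ) (v : ν) :
    (if d.contains k then d else d.insert k v) = d.setdefault k v := by
  by_cases h : d.contains k
  · rw [if_pos h, PySem.Dict.setdefault_of_contains d v h]
  · rw [if_neg h, PySem.Dict.setdefault_of_not_contains d v (by simpa using h)]

theorem A_flat (spec : List (String × List (String × List (List (String × String))))) :
    pyPointsByPollA spec = (pvPts spec).foldl (fun out t =>
      if !out.contains (pvPollOf t.2.2) || pvPollOf t.2.2 == "N/A" then out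
      else out.modify (pvPollOf t.2.2) [] (fun v => v ++ [(t.1, t.2.1, pvAddr0Of t.2.2, t.2.2)]))
      (PySem.Dict.mk [("FAST", []), ("SLOW", []), ("VERY_SLOW", [])]) := by
  unfold pyPointsByPollA pvPts
  simp only [List.foldl_flatMap, List.foldl_map]

theorem B_flat (spec : List (String × List (String × List (List (String × String))))) (pg : String) :
    spec.foldl (fun g sb =>
      pvBlockKeys.foldl (fun g bk =>
        ((PySem.Dict.mk sb.2).getD bk []).foldl (fun g p =>
          if pvPollOf p == pg then
            (g.setdefault (sb.1, bk) PySem.Set.empty).modify (sb.1, bk) PySem.Set.empty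
              (fun s => PySem.Set.add s (pvAddr0Of p))
          else g) g) g) PySem.Dict.empty
    = (pvPts spec).foldl (fun g t =>
        if pvPollOf t.2.2 == pg then
          (g.setdefault (t.1, t.2.1) PySem.Set.empty).modify (t.1, t.2.1) PySem.Set.empty
            (fun s => PySem.Set.add s (pvAddr0Of t.2.2))
        else g) PySem.Dict.empty := by
  unfold pvPts
  simp only [List.foldl_flatMap, List.foldl_map]

theorem perkeyB (u : List Int) :
    ((PySem.List.enumerate (PySem.List.sorted (PySem.Set.ofList u) (fun x => x))).foldl
        (fun r ia => (r.setdefault (ia.2 - ia.1) []).modify (ia.2 - ia.1) []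
          (fun run => run ++ [ia.2])) PySem.Dict.empty).values
      = chunks (PySem.List.sorted (PySem.Set.ofList u) (fun x => x)) := by
  have hlt := PySem.List.sorted_ofList_pairwise_lt u
  set s := PySem.List.sorted (PySem.Set.ofList u) (fun x => x) with hs
  have hkeys := keys_foldl_setmod (fun ia : Int × Int => ia.2 - ia.1)
    (fun run ia => run ++ [ia.2]) [] (PySem.List.enumerate s) PySem.Dict.empty
  simp only [] at hkeys
  rw [PySem.Dict.values_eq_map_keys _
    (by rw [hkeys, PySem.Dict.keys_empty, PySem.Set.update_nil_left]
        exact PySem.Set.nodup_ofList _) []]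
  rw [hkeys, PySem.Dict.keys_empty, PySem.Set.update_nil_left]
  rw [← grp s hlt 0]
  apply List.map_congr_left
  intro o _
  have hg := getD_foldl_setmod (fun ia : Int × Int => ia.2 - ia.1)
    (fun run ia => run ++ [ia.2]) [] (PySem.List.enumerate s) PySem.Dict.empty o
  simp only [] at hg
  rw [hg, PySem.Dict.getD_empty]
  exact (PySem.List.foldl_append_singleton_eq_map (fun ia : Int × Int => ia.2) _ []).trans
    (List.nil_append _)

-- ===== VERDICT (by name: the statement is the Claim_ definition above) =====
theorem build_read_plan_py_spec : Claim_equal_build_read_plan_py := by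
  intro spec pg _hdom _hpre
  unfold Spec_build_read_plan_py build_read_plan_py build_read_plan_py_alt
  dsimp only []
  by_cases hpg : pg = "FAST" ∨ pg = "SLOW" ∨ pg = "VERY_SLOW"
  case neg =>
    push_neg at hpg
    have hb : (pg == "FAST" || pg == "SLOW" || pg == "VERY_SLOW") = false := by
      simp [hpg.1, hpg.2.1, hpg.2.2]
    rw [hb]
    rw [if_pos (by simp)]
    rw [A_flat]
    have hcon := contains_foldl_pbp (fun t => pvPollOf t.2.2)
      (fun t => (t.1, t.2.1, pvAddr0Of t.2.2, t.2.2)) (pvPts spec)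
      (PySem.Dict.mk [("FAST", []), ("SLOW", []), ("VERY_SLOW", [])]) pg
    simp only [] at hcon
    have hzero : ((pvPts spec).foldl (fun out t =>
        if !out.contains (pvPollOf t.2.2) || pvPollOf t.2.2 == "N/A" then out
        else out.modify (pvPollOf t.2.2) [] (fun v => v ++ [(t.1, t.2.1, pvAddr0Of t.2.2, t.2.2)]))
        (PySem.Dict.mk [("FAST", []), ("SLOW", []), ("VERY_SLOW", [])])).getD pg [] = [] := by
      apply PySem.Dict.getD_of_not_contains
      rw [hcon, PySem.Dict.contains_mk]
      simp [Ne.symm hpg.1, Ne.symm hpg.2.1, Ne.symm hpg.2.2]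
    rw [hzero]
    rfl
  case pos =>
    have hpgne : pg ≠ "N/A" := by rcases hpg with h | h | h <;> simp [h]
    have hb : (pg == "FAST" || pg == "SLOW" || pg == "VERY_SLOW") = true := by
      rcases hpg with h | h | h <;> simp [h]
    rw [hb]
    rw [if_neg (by simp)]
    -- A side: the pg slot of _points_by_poll collects exactly the matching points
    rw [A_flat]
    have hconInit : (PySem.Dict.mk ([("FAST", []), ("SLOW", []), ("VERY_SLOW", [])] :
        List (String × List (String × String × Int × List (String × String))))).contains pg
        = true := by
      rw [PySem.Dict.contains_mk]; rcases hpg with h | h | h <;> simp [h]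
    have hpts := getD_foldl_pbp (fun t => pvPollOf t.2.2)
      (fun t => (t.1, t.2.1, pvAddr0Of t.2.2, t.2.2)) (pvPts spec) _ pg hconInit hpgne
    simp only [] at hpts
    rw [hpts]
    have hinit : (PySem.Dict.mk ([("FAST", []), ("SLOW", []), ("VERY_SLOW", [])] :
        List (String × List (String × String × Int × List (String × String))))).getD pg [] = [] := by
      rcases hpg with h | h | h <;> subst h <;> rfl
    rw [hinit, List.nil_append]
    rw [B_flat]
    rw [PySem.List.foldl_if_eq_foldl_filter (fun t => pvPollOf t.2.2 == pg)
      (fun g t => (g.setdefault (t.1, t.2.1) PySem.Set.empty).modify (t.1, t.2.1) PySem.Set.empty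
        (fun s => PySem.Set.add s (pvAddr0Of t.2.2))) (pvPts spec) PySem.Dict.empty]
    rw [List.foldl_map]
    -- both grouping dicts, over the same filtered traversal Lf
    set Lf := (pvPts spec).filter (fun t => pvPollOf t.2.2 == pg) with hLf
    have hstep : (fun (d : PySem.Dict (String × String) (List Int))
        (t : String × String × List (String × String)) =>
        (if d.contains (t.1, t.2.1) then d else d.insert (t.1, t.2.1) []).modify (t.1, t.2.1) []
          (fun v => v ++ [pvAddr0Of t.2.2]))
        = fun d t => (d.setdefault (t.1, t.2.1) []).modify (t.1, t.2.1) []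
          (fun v => v ++ [pvAddr0Of t.2.2]) := by
      funext d t
      rw [setdefault_eq_ite]
    show (Lf.foldl (fun d t =>
        (if d.contains (t.1, t.2.1) then d else d.insert (t.1, t.2.1) []).modify (t.1, t.2.1) []
          (fun v => v ++ [pvAddr0Of t.2.2])) PySem.Dict.empty).items.foldl _ [] = _
    rw [hstep]
    -- characterize both item lists over the common key list K
    have hkeysA := keys_foldl_setmod (fun t : String × String × List (String × String) =>
      (t.1, t.2.1)) (fun v t => v ++ [pvAddr0Of t.2.2]) [] Lf PySem.Dict.empty
    have hkeysB := keys_foldl_setmod (fun t : String × String × List (String × String) =>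
      (t.1, t.2.1)) (fun v t => PySem.Set.add v (pvAddr0Of t.2.2)) PySem.Set.empty Lf
      PySem.Dict.empty
    simp only [] at hkeysA hkeysB
    have hKnodup : (PySem.Set.ofList (Lf.map (fun t => (t.1, t.2.1)))).Nodup :=
      PySem.Set.nodup_ofList _
    have hitemsA : (Lf.foldl (fun d t => (d.setdefault (t.1, t.2.1) []).modify (t.1, t.2.1) []
        (fun v => v ++ [pvAddr0Of t.2.2])) PySem.Dict.empty).items
        = (PySem.Set.ofList (Lf.map (fun t => (t.1, t.2.1)))).map (fun c =>
            (c, (Lf.filter (fun t => (t.1, t.2.1) == c)).map (fun t => pvAddr0Of t.2.2))) := by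
      rw [PySem.Dict.items_eq_map_keys _
        (by rw [hkeysA, PySem.Dict.keys_empty, PySem.Set.update_nil_left]; exact hKnodup) []]
      rw [hkeysA, PySem.Dict.keys_empty, PySem.Set.update_nil_left]
      apply List.map_congr_left
      intro c _
      have hg := getD_foldl_setmod (fun t : String × String × List (String × String) =>
        (t.1, t.2.1)) (fun v t => v ++ [pvAddr0Of t.2.2]) [] Lf PySem.Dict.empty c
      simp only [] at hg
      rw [hg, PySem.Dict.getD_empty]
      rw [(PySem.List.foldl_append_singleton_eq_map
        (fun t : String × String × List (String × String) => pvAddr0Of t.2.2) _ []).trans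
        (List.nil_append _)]
    have hitemsB : (Lf.foldl (fun d t =>
        (d.setdefault (t.1, t.2.1) PySem.Set.empty).modify (t.1, t.2.1) PySem.Set.empty
          (fun v => PySem.Set.add v (pvAddr0Of t.2.2))) PySem.Dict.empty).items
        = (PySem.Set.ofList (Lf.map (fun t => (t.1, t.2.1)))).map (fun c =>
            (c, PySem.Set.ofList ((Lf.filter (fun t => (t.1, t.2.1) == c)).map
              (fun t => pvAddr0Of t.2.2)))) := by
      rw [PySem.Dict.items_eq_map_keys _
        (by rw [hkeysB, PySem.Dict.keys_empty, PySem.Set.update_nil_left]; exact hKnodup)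
        PySem.Set.empty]
      rw [hkeysB, PySem.Dict.keys_empty, PySem.Set.update_nil_left]
      apply List.map_congr_left
      intro c _
      have hg := getD_foldl_setmod (fun t : String × String × List (String × String) =>
        (t.1, t.2.1)) (fun v t => PySem.Set.add v (pvAddr0Of t.2.2)) PySem.Set.empty Lf
        PySem.Dict.empty c
      simp only [] at hg
      rw [hg, PySem.Dict.getD_empty]
      rw [PySem.Set.ofList_eq_foldl, List.foldl_map]
      rfl
    rw [hitemsA, hitemsB]
    -- emit the plan: both outer loops are flatMaps over K
    have houterA : (fun (plan : List (String × String × Int × Int))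
        (kv : (String × String) × List Int) =>
        (pyRangesA ((PySem.List.sorted (PySem.Set.ofList kv.2) (fun x => x)).map
          (fun a => [("addr0", a)]))).foldl
          (fun plan sc => plan ++ [(kv.1.1, kv.1.2, sc.1, sc.2)]) plan)
        = fun plan kv => plan ++ (pyRangesA ((PySem.List.sorted (PySem.Set.ofList kv.2)
            (fun x => x)).map (fun a => [("addr0", a)]))).map
            (fun sc => (kv.1.1, kv.1.2, sc.1, sc.2)) := by
      funext plan kv
      rw [PySem.List.foldl_append_singleton_eq_map]
    have houterB : (fun (plan : List (String × String × Int × Int))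
        (kv : (String × String) × PySem.Set Int) =>
        ((PySem.List.enumerate (PySem.List.sorted kv.2 (fun x => x))).foldl
          (fun r ia => (r.setdefault (ia.2 - ia.1) []).modify (ia.2 - ia.1) []
            (fun run => run ++ [ia.2])) PySem.Dict.empty).values.foldl
          (fun plan run => plan ++ [(kv.1.1, kv.1.2, PySem.List.pyGetD run 0 0,
            (run.length : Int))]) plan)
        = fun plan kv => plan ++ ((PySem.List.enumerate (PySem.List.sorted kv.2
            (fun x => x))).foldl
          (fun r ia => (r.setdefault (ia.2 - ia.1) []).modify (ia.2 - ia.1) []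
            (fun run => run ++ [ia.2])) PySem.Dict.empty).values.map
            (fun run => (kv.1.1, kv.1.2, PySem.List.pyGetD run 0 0, (run.length : Int))) := by
      funext plan kv
      rw [PySem.List.foldl_append_singleton_eq_map]
    rw [houterA, houterB, PySem.List.foldl_append_eq_flatMap, PySem.List.foldl_append_eq_flatMap,
      List.nil_append, List.nil_append, List.flatMap_map, List.flatMap_map]
    congr 1
    funext c
    dsimp only []
    rw [perkey, List.map_map]
    have hB := perkeyB ((Lf.filter (fun t => (t.1, t.2.1) == c)).map (fun t => pvAddr0Of t.2.2))
    rw [hB]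
    rfl
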